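-- pv_equiv track=rewrite | github.com/tapiatellez/Comprehensibility | Comprensibilidad.py | get_best_paragraph
-- ===== SOURCE A (Python) =====
-- def get_best_paragraph(paragraphs_concept_appearance):
--     ordered_list = []
--     weight = 0
--     for paragraph, paragraph_weight in paragraphs_concept_appearance.items():
--         if paragraph_weight > weight:
--             ordered_list.insert(0,paragraph)
--         else:
--             ordered_list.append(paragraph)
--     return ordered_list
-- ===== SOURCE B (Python) =====
-- def get_best_paragraph(paragraphs_concept_appearance):
--     positives = []
--     rest = []
--     for paragraph, paragraph_weight in paragraphs_concept_appearance.items():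
--         if paragraph_weight > 0:
--             positives.append(paragraph)
--         else:
--             rest.append(paragraph)
--     positives.reverse()
--     return positives + rest
-- ===== Notes on version B (the rewrite author's own statement) =====
-- stated objective: alternative
-- what changed: Instead of inserting each positive-weight paragraph at position 0 of one growing list, B appends into two separate lists in one pass and returns reversed(positives) + rest.
import Mathlib
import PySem

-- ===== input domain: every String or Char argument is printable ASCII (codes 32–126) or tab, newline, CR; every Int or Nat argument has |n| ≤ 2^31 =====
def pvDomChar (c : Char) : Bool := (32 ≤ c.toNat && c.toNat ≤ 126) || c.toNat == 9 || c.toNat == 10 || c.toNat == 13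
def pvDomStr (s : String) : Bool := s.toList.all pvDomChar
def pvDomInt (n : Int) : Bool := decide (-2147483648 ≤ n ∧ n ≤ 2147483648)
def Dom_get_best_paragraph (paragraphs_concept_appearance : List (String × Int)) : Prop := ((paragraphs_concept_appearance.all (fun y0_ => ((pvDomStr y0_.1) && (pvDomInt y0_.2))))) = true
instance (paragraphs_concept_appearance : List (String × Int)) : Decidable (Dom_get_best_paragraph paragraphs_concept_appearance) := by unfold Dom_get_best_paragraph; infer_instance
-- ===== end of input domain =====

-- B replaces A's insert-at-front into one growing list by a single pass that appends into
-- two separate lists and returns reversed positives ++ rest (alternative decomposition).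

-- ===== PORT A =====
-- for each (paragraph, weight): weight variable stays 0, so 'paragraph_weight > weight' is 'w > 0';
-- insert(0, p) prepends, append adds at the end
def get_best_paragraph (paragraphs_concept_appearance : List (String × Int)) : List String :=
  paragraphs_concept_appearance.foldl
    (fun ordered_list pw =>
      if pw.2 > 0 then pw.1 :: ordered_list else ordered_list ++ [pw.1])
    []

-- ===== PORT B =====
def get_best_paragraph_alt (paragraphs_concept_appearance : List (String × Int)) : List String :=
  let acc := paragraphs_concept_appearance.foldl
    (fun (st : List String × List String) pw =>
      if pw.2 > 0 then (st.1 ++ [pw.1], st.2) else (st.1, st.2 ++ [pw.1]))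
    ([], [])
  acc.1.reverse ++ acc.2

-- ===== PRECONDITION & SPEC =====
def Spec_get_best_paragraph (paragraphs_concept_appearance : List (String × Int)) (out : List String) : Prop := out = get_best_paragraph_alt paragraphs_concept_appearance
instance (paragraphs_concept_appearance : List (String × Int)) (out : List String) : Decidable (Spec_get_best_paragraph paragraphs_concept_appearance out) := by unfold Spec_get_best_paragraph; infer_instance

-- ===== CLAIM (what is proved, stated in full; the proofs are below) =====
def Claim_equal_get_best_paragraph : Prop := ∀ (paragraphs_concept_appearance : List (String × Int)), Dom_get_best_paragraph paragraphs_concept_appearance → Spec_get_best_paragraph paragraphs_concept_appearance (get_best_paragraph paragraphs_concept_appearance)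

-- ===== LEMMAS AND PROOFS =====

-- A's loop from state acc yields reverse(positives) ++ acc ++ rest.
theorem pvA_invariant (xs : List (String × Int)) (acc : List String) :
    xs.foldl (fun ordered_list pw =>
        if pw.2 > 0 then pw.1 :: ordered_list else ordered_list ++ [pw.1]) acc
    = ((xs.filter (fun pw => pw.2 > 0)).map Prod.fst).reverse ++ acc
        ++ (xs.filter (fun pw => ¬ pw.2 > 0)).map Prod.fst := by
  induction xs generalizing acc with
  | nil => simp
  | cons pw t ih =>
    by_cases h : pw.2 > 0
    · simp [List.foldl, h, ih]
    · simp [List.foldl, h, not_lt.1 h, ih, List.filter_cons]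

-- B's loop from state (p, r) yields (p ++ positives, r ++ rest).
theorem pvB_invariant (xs : List (String × Int)) (st : List String × List String) :
    xs.foldl (fun (st : List String × List String) pw =>
        if pw.2 > 0 then (st.1 ++ [pw.1], st.2) else (st.1, st.2 ++ [pw.1])) st
    = (st.1 ++ (xs.filter (fun pw => pw.2 > 0)).map Prod.fst,
       st.2 ++ (xs.filter (fun pw => ¬ pw.2 > 0)).map Prod.fst) := by
  induction xs generalizing st with
  | nil => simp
  | cons pw t ih =>
    by_cases h : pw.2 > 0
    · simp [List.foldl, h, ih]
    · simp [List.foldl, h, not_lt.1 h, ih]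

-- ===== VERDICT (by name: the statement is the Claim_ definition above) =====
theorem get_best_paragraph_spec : Claim_equal_get_best_paragraph := by
  intro xs _
  unfold Spec_get_best_paragraph get_best_paragraph get_best_paragraph_alt
  simp [pvA_invariant, pvB_invariant]
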